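-- pv_equiv track=rewrite | github.com/marimotona/GoogleSTEP2023 | day3/hw3/poland_calculator.py | parse_rpn
-- ===== SOURCE A (Python) =====
-- def parse_rpn(line):
--     stack = []
--     operator = []
--
--     for char in line:
--         if char.isdigit():
--             stack.append(char)
--         else:
--             operator.append(char)
--     stack.extend(operator)
--     return ''.join(stack)
-- ===== SOURCE B (Python) =====
-- def parse_rpn(line):
--     return ''.join(sorted(line, key=lambda c: not c.isdigit()))
-- ===== Notes on version B (the rewrite author's own statement) =====
-- stated objective: idiomatic
-- what changed: Replaces the manual two-accumulator partition loop with a single stable sort keyed on whether each character is a non-digit, relying on sort stability to keep digits then operators in original order.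
import Mathlib
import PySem

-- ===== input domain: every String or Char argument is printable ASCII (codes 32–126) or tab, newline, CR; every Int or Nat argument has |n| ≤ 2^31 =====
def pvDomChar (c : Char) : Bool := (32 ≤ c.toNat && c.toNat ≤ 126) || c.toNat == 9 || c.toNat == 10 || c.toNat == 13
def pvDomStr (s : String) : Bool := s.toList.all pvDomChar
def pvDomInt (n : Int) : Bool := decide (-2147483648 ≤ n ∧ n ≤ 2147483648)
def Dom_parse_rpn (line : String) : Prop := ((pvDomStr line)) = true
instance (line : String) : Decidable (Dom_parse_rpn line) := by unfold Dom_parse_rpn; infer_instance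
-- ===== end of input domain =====

-- B replaces A's manual two-accumulator partition loop with one stable sort keyed on
-- "is not a digit" (more idiomatic); equal return value proved on the whole domain.

-- ===== PORT A =====
-- stack = []; operator = []; for char in line: append to one of them; stack.extend(operator); ''.join(stack)
def parse_rpn (line : String) : String :=
  let st :=
    line.toList.foldl
      (fun (acc : List Char × List Char) char =>
        if PySem.Chars.isdigit char then (acc.1 ++ [char], acc.2)
        else (acc.1, acc.2 ++ [char]))
      ([], [])
  String.ofList (st.1 ++ st.2)

-- ===== PORT B =====
-- ''.join(sorted(line, key=lambda c: not c.isdigit()))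
def parse_rpn_alt (line : String) : String :=
  String.ofList (PySem.List.sorted line.toList (fun c => !PySem.Chars.isdigit c) false)

-- ===== PRECONDITION & SPEC =====
def Spec_parse_rpn (line : String) (out : String) : Prop := out = parse_rpn_alt line
instance (line : String) (out : String) : Decidable (Spec_parse_rpn line out) := by unfold Spec_parse_rpn; infer_instance

-- ===== CLAIM =====
def Claim_equal_parse_rpn : Prop := ∀ (line : String), Dom_parse_rpn line → Spec_parse_rpn line (parse_rpn line)

-- ===== LEMMAS AND PROOFS =====

-- A's loop, generalized over the accumulators: it is the filter-partition of the input.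
theorem parse_rpn_foldl_eq (cs : List Char) : ∀ (st op : List Char),
    cs.foldl
      (fun (acc : List Char × List Char) char =>
        if PySem.Chars.isdigit char then (acc.1 ++ [char], acc.2)
        else (acc.1, acc.2 ++ [char]))
      (st, op)
    = (st ++ cs.filter (fun c => PySem.Chars.isdigit c),
       op ++ cs.filter (fun c => !PySem.Chars.isdigit c)) := by
  induction cs with
  | nil => intro st op; simp
  | cons c cs ih =>
    intro st op
    by_cases h : PySem.Chars.isdigit c
    · simp [List.foldl_cons, h, ih]
    · simp [List.foldl_cons, h, ih]

-- Inserting a non-digit (key true) conses nothing before it: it goes to the end.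
theorem insertBy_key_true (key : Char → Bool) (x : Char) (hx : key x = true) (ys : List Char) :
    PySem.List.insertBy (fun a b => decide (key a < key b)) x ys = ys ++ [x] := by
  apply PySem.List.insertBy_of_forall_not_before
  intro y _
  simp [hx]

-- Inserting a digit (key false) into D ++ O (D all key-false, O all key-true) puts it after D.
theorem insertBy_key_false (key : Char → Bool) (x : Char) (hx : key x = false)
    (D O : List Char) (hD : ∀ d ∈ D, key d = false) (hO : ∀ o ∈ O, key o = true) :
    PySem.List.insertBy (fun a b => decide (key a < key b)) x (D ++ O)
      = (D ++ [x]) ++ O := by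
  induction D with
  | nil =>
    cases O with
    | nil => simp [PySem.List.insertBy]
    | cons o os =>
      have ho : key o = true := hO o (by simp)
      simp [PySem.List.insertBy, hx, ho]
  | cons d ds ih =>
    have hd : key d = false := hD d (by simp)
    have : PySem.List.insertBy (fun a b => decide (key a < key b)) x ((d :: ds) ++ O)
        = d :: PySem.List.insertBy (fun a b => decide (key a < key b)) x (ds ++ O) := by
      simp [PySem.List.insertBy, hx, hd]
    rw [this, ih (fun y hy => hD y (by simp [hy]))]
    simp

-- The insertion-sort fold with the boolean key maintains "digits so far ++ non-digits so far".
theorem foldl_insertBy_partition (key : Char → Bool) (cs : List Char) :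
    ∀ (D O : List Char), (∀ d ∈ D, key d = false) → (∀ o ∈ O, key o = true) →
    cs.foldl (fun acc x => PySem.List.insertBy (fun a b => decide (key a < key b)) x acc) (D ++ O)
      = (D ++ cs.filter (fun c => !key c)) ++ (O ++ cs.filter (fun c => key c)) := by
  induction cs with
  | nil => intro D O _ _; simp
  | cons c cs ih =>
    intro D O hD hO
    by_cases h : key c
    · have hO' : ∀ o ∈ O ++ [c], key o = true := by
        intro o ho
        rcases List.mem_append.mp ho with h' | h'
        · exact hO o h'
        · simp at h'; subst h'; exact h
      rw [List.foldl_cons, insertBy_key_true key c h (D ++ O), List.append_assoc,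
        ih D (O ++ [c]) hD hO']
      simp [h]
    · have hD' : ∀ d ∈ D ++ [c], key d = false := by
        intro d hd
        rcases List.mem_append.mp hd with h' | h'
        · exact hD d h'
        · simp at h'; subst h'; simpa using h
      rw [List.foldl_cons,
        insertBy_key_false key c (by simpa using h) D O hD hO,
        ih (D ++ [c]) O hD' hO]
      simp [h]

theorem sorted_bool_key_eq_partition (key : Char → Bool) (cs : List Char) :
    PySem.List.sorted cs key false
      = cs.filter (fun c => !key c) ++ cs.filter (fun c => key c) := by
  rw [PySem.List.sorted_eq_foldl_insertBy]
  simpa using foldl_insertBy_partition key cs [] [] (by simp) (by simp)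

-- ===== VERDICT =====
theorem parse_rpn_spec : Claim_equal_parse_rpn := by
  intro line _
  unfold Spec_parse_rpn parse_rpn parse_rpn_alt
  rw [sorted_bool_key_eq_partition, parse_rpn_foldl_eq]
  simp
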